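-- pv_equiv track=rewrite | github.com/poorni666/Reactive-Tabu-Search-for-Neural-Network | basic_tabu.py | move_change
-- ===== SOURCE A (Python) =====
-- def move_change(r, s, current_perm, flow, distance, n):
--     facility_r = current_perm[r]
--     facility_s = current_perm[s]
--     delta = 0
--     for k in range(n):
--         if k != r and k != s:
--             facility_k = current_perm[k]
--             delta += (flow[facility_r][facility_k] - flow[facility_s][facility_k]) * \
--                      (distance[s][k] - distance[r][k])
--             delta += (flow[facility_k][facility_r] - flow[facility_k][facility_s]) * \
--                      (distance[k][s] - distance[k][r])
--     delta += (flow[facility_r][facility_s] - flow[facility_s][facility_r]) * \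
--              (distance[s][r] - distance[r][s])
--     return delta
-- ===== SOURCE B (Python) =====
-- def move_change(r, s, current_perm, flow, distance, n):
--     facility_r = current_perm[r]
--     facility_s = current_perm[s]
--
--     def attach_cost(facility, loc):
--         # interaction cost of having `facility` at position `loc` with all
--         # positions other than r and s
--         total = 0
--         for k in range(n):
--             if k != r and k != s:
--                 fk = current_perm[k]
--                 total += flow[facility][fk] * distance[loc][k] \
--                          + flow[fk][facility] * distance[k][loc]
--         return total
--
--     # inclusion-exclusion: facility_r moves from r to s, facility_s from s to r
--     return (attach_cost(facility_r, s) - attach_cost(facility_r, r)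
--             - attach_cost(facility_s, s) + attach_cost(facility_s, r)
--             + (flow[facility_r][facility_s] - flow[facility_s][facility_r])
--               * (distance[s][r] - distance[r][s]))
-- ===== Notes on version B (the rewrite author's own statement) =====
-- stated objective: alternative
-- what changed: B decomposes the swap delta into four 'attachment cost' dot products (interaction cost of a facility placed at a location with all other positions, computed by a helper called four times) combined by inclusion-exclusion, instead of A's single fused loop over factored differences; same O(n) cost, different decomposition and intermediate values.
import Mathlib
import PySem

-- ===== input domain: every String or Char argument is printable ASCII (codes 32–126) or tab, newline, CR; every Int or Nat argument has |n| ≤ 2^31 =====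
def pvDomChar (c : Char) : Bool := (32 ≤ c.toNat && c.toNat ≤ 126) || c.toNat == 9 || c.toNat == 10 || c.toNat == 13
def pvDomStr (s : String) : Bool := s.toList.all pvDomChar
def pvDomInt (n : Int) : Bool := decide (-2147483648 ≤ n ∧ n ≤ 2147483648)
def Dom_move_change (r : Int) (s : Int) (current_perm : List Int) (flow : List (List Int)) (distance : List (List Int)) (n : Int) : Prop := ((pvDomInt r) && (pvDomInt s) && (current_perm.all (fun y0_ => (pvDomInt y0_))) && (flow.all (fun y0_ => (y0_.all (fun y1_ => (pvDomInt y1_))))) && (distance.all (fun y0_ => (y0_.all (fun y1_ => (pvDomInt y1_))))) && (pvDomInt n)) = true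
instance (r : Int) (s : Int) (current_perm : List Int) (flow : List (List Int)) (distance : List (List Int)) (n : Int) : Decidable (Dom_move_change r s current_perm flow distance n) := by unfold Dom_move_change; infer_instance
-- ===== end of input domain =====

-- B replaces A's single fused loop of factored differences by four 'attachment cost'
-- dot products (a helper called four times) combined by inclusion-exclusion: a
-- different decomposition of the same O(n) swap-delta, not faster.

-- m[i][j] for a matrix given as a list of rows (Python chained indexing; the
-- defaults matter only outside Pre_, where Python raises IndexError)
def pvIdx2 (m : List (List Int)) (i j : Int) : Int :=
  PySem.List.pyGetD (PySem.List.pyGetD m i []) j 0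

-- ===== PORT A =====
def move_change (r : Int) (s : Int) (current_perm : List Int) (flow : List (List Int)) (distance : List (List Int)) (n : Int) : Int :=
  let facility_r := PySem.List.pyGetD current_perm r 0
  let facility_s := PySem.List.pyGetD current_perm s 0
  let delta : Int := (PySem.List.pyRange 0 n 1).foldl (fun delta k =>
    if k ≠ r ∧ k ≠ s then
      let facility_k := PySem.List.pyGetD current_perm k 0
      delta + (pvIdx2 flow facility_r facility_k - pvIdx2 flow facility_s facility_k) *
                (pvIdx2 distance s k - pvIdx2 distance r k)
            + (pvIdx2 flow facility_k facility_r - pvIdx2 flow facility_k facility_s) *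
                (pvIdx2 distance k s - pvIdx2 distance k r)
    else delta) 0
  delta + (pvIdx2 flow facility_r facility_s - pvIdx2 flow facility_s facility_r) *
            (pvIdx2 distance s r - pvIdx2 distance r s)

-- ===== PORT B =====
-- interaction cost of having `facility` at position `loc` with all positions other than r and s
def pvAttachCost (r : Int) (s : Int) (current_perm : List Int) (flow : List (List Int)) (distance : List (List Int)) (n : Int) (facility : Int) (loc : Int) : Int :=
  (PySem.List.pyRange 0 n 1).foldl (fun total k =>
    if k ≠ r ∧ k ≠ s then
      total + pvIdx2 flow facility (PySem.List.pyGetD current_perm k 0) * pvIdx2 distance loc k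
            + pvIdx2 flow (PySem.List.pyGetD current_perm k 0) facility * pvIdx2 distance k loc
    else total) 0

def move_change_alt (r : Int) (s : Int) (current_perm : List Int) (flow : List (List Int)) (distance : List (List Int)) (n : Int) : Int :=
  let facility_r := PySem.List.pyGetD current_perm r 0
  let facility_s := PySem.List.pyGetD current_perm s 0
  -- inclusion-exclusion: facility_r moves from r to s, facility_s from s to r
  pvAttachCost r s current_perm flow distance n facility_r s
    - pvAttachCost r s current_perm flow distance n facility_r r
    - pvAttachCost r s current_perm flow distance n facility_s s
    + pvAttachCost r s current_perm flow distance n facility_s r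
    + (pvIdx2 flow facility_r facility_s - pvIdx2 flow facility_s facility_r) *
        (pvIdx2 distance s r - pvIdx2 distance r s)

-- ===== PRECONDITION & SPEC =====
-- Pre_ holds exactly when Python A raises no IndexError: every list/matrix index A
-- performs (including the negative-index wraparound Python allows) is in range.
def Pre_move_change (r : Int) (s : Int) (current_perm : List Int) (flow : List (List Int)) (distance : List (List Int)) (n : Int) : Prop :=
  PySem.Raise.InRange current_perm.length r ∧
  PySem.Raise.InRange current_perm.length s ∧
  (let fr := PySem.List.pyGetD current_perm r 0
   let fs := PySem.List.pyGetD current_perm s 0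
   PySem.Raise.InRange flow.length fr ∧
   PySem.Raise.InRange flow.length fs ∧
   PySem.Raise.InRange (PySem.List.pyGetD flow fr []).length fs ∧
   PySem.Raise.InRange (PySem.List.pyGetD flow fs []).length fr ∧
   PySem.Raise.InRange distance.length r ∧
   PySem.Raise.InRange distance.length s ∧
   PySem.Raise.InRange (PySem.List.pyGetD distance s []).length r ∧
   PySem.Raise.InRange (PySem.List.pyGetD distance r []).length s ∧
   ∀ k ∈ PySem.List.pyRange 0 n 1, k ≠ r → k ≠ s →
     PySem.Raise.InRange current_perm.length k ∧
     (let fk := PySem.List.pyGetD current_perm k 0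
      PySem.Raise.InRange flow.length fk ∧
      PySem.Raise.InRange (PySem.List.pyGetD flow fr []).length fk ∧
      PySem.Raise.InRange (PySem.List.pyGetD flow fs []).length fk ∧
      PySem.Raise.InRange (PySem.List.pyGetD flow fk []).length fr ∧
      PySem.Raise.InRange (PySem.List.pyGetD flow fk []).length fs ∧
      PySem.Raise.InRange distance.length k ∧
      PySem.Raise.InRange (PySem.List.pyGetD distance s []).length k ∧
      PySem.Raise.InRange (PySem.List.pyGetD distance r []).length k ∧
      PySem.Raise.InRange (PySem.List.pyGetD distance k []).length s ∧
      PySem.Raise.InRange (PySem.List.pyGetD distance k []).length r))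
instance (r : Int) (s : Int) (current_perm : List Int) (flow : List (List Int)) (distance : List (List Int)) (n : Int) : Decidable (Pre_move_change r s current_perm flow distance n) := by unfold Pre_move_change; infer_instance

def pvWitness_move_change : Int × Int × List Int × List (List Int) × List (List Int) × Int :=
  (0, 1, [1, 0], [[0, 3], [2, 0]], [[0, 5], [4, 0]], 2)

def Spec_move_change (r : Int) (s : Int) (current_perm : List Int) (flow : List (List Int)) (distance : List (List Int)) (n : Int) (out : Int) : Prop := out = move_change_alt r s current_perm flow distance n
instance (r : Int) (s : Int) (current_perm : List Int) (flow : List (List Int)) (distance : List (List Int)) (n : Int) (out : Int) : Decidable (Spec_move_change r s current_perm flow distance n out) := by unfold Spec_move_change; infer_instance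

-- ===== CLAIM (what is proved, stated in full; the proofs are below) =====
def Claim_equal_move_change : Prop := ∀ (r : Int) (s : Int) (current_perm : List Int) (flow : List (List Int)) (distance : List (List Int)) (n : Int), Dom_move_change r s current_perm flow distance n → Pre_move_change r s current_perm flow distance n → Spec_move_change r s current_perm flow distance n (move_change r s current_perm flow distance n)

-- ===== LEMMAS AND PROOFS =====

lemma pv_foldl_ite_add2 (l : List Int) (p : Int → Prop) [DecidablePred p] (f g : Int → Int) (a : Int) :
    l.foldl (fun acc k => if p k then acc + f k + g k else acc) a
      = a + (l.map (fun k => if p k then f k + g k else 0)).sum := by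
  induction l generalizing a with
  | nil => simp
  | cons x xs ih => simp only [List.foldl_cons, List.map_cons, List.sum_cons, ih]; split_ifs <;> ring

lemma pv_sum_map_comb (l : List Int) (f1 f2 f3 f4 g : Int → Int)
    (h : ∀ k ∈ l, g k = f1 k - f2 k - f3 k + f4 k) :
    (l.map g).sum = (l.map f1).sum - (l.map f2).sum - (l.map f3).sum + (l.map f4).sum := by
  induction l with
  | nil => simp
  | cons x xs ih =>
      simp only [List.map_cons, List.sum_cons, ih (fun k hk => h k (List.mem_cons_of_mem x hk)),
        h x List.mem_cons_self]
      ring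

-- ===== VERDICT (by name: the statement is the Claim_ definition above) =====
theorem move_change_spec : Claim_equal_move_change := by
  intro r s cp fl di n _ _
  unfold Spec_move_change
  simp only [move_change, move_change_alt, pvAttachCost]
  rw [pv_foldl_ite_add2 (PySem.List.pyRange 0 n 1) (fun k => k ≠ r ∧ k ≠ s)
        (fun k => (pvIdx2 fl (PySem.List.pyGetD cp r 0) (PySem.List.pyGetD cp k 0)
            - pvIdx2 fl (PySem.List.pyGetD cp s 0) (PySem.List.pyGetD cp k 0))
            * (pvIdx2 di s k - pvIdx2 di r k))
        (fun k => (pvIdx2 fl (PySem.List.pyGetD cp k 0) (PySem.List.pyGetD cp r 0)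
            - pvIdx2 fl (PySem.List.pyGetD cp k 0) (PySem.List.pyGetD cp s 0))
            * (pvIdx2 di k s - pvIdx2 di k r)) 0,
     pv_foldl_ite_add2 (PySem.List.pyRange 0 n 1) (fun k => k ≠ r ∧ k ≠ s)
        (fun k => pvIdx2 fl (PySem.List.pyGetD cp r 0) (PySem.List.pyGetD cp k 0) * pvIdx2 di s k)
        (fun k => pvIdx2 fl (PySem.List.pyGetD cp k 0) (PySem.List.pyGetD cp r 0) * pvIdx2 di k s) 0,
     pv_foldl_ite_add2 (PySem.List.pyRange 0 n 1) (fun k => k ≠ r ∧ k ≠ s)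
        (fun k => pvIdx2 fl (PySem.List.pyGetD cp r 0) (PySem.List.pyGetD cp k 0) * pvIdx2 di r k)
        (fun k => pvIdx2 fl (PySem.List.pyGetD cp k 0) (PySem.List.pyGetD cp r 0) * pvIdx2 di k r) 0,
     pv_foldl_ite_add2 (PySem.List.pyRange 0 n 1) (fun k => k ≠ r ∧ k ≠ s)
        (fun k => pvIdx2 fl (PySem.List.pyGetD cp s 0) (PySem.List.pyGetD cp k 0) * pvIdx2 di s k)
        (fun k => pvIdx2 fl (PySem.List.pyGetD cp k 0) (PySem.List.pyGetD cp s 0) * pvIdx2 di k s) 0,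
     pv_foldl_ite_add2 (PySem.List.pyRange 0 n 1) (fun k => k ≠ r ∧ k ≠ s)
        (fun k => pvIdx2 fl (PySem.List.pyGetD cp s 0) (PySem.List.pyGetD cp k 0) * pvIdx2 di r k)
        (fun k => pvIdx2 fl (PySem.List.pyGetD cp k 0) (PySem.List.pyGetD cp s 0) * pvIdx2 di k r) 0]
  have hcomb :
      (List.map (fun k =>
          if k ≠ r ∧ k ≠ s then
            (pvIdx2 fl (PySem.List.pyGetD cp r 0) (PySem.List.pyGetD cp k 0)
              - pvIdx2 fl (PySem.List.pyGetD cp s 0) (PySem.List.pyGetD cp k 0))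
              * (pvIdx2 di s k - pvIdx2 di r k)
            + (pvIdx2 fl (PySem.List.pyGetD cp k 0) (PySem.List.pyGetD cp r 0)
              - pvIdx2 fl (PySem.List.pyGetD cp k 0) (PySem.List.pyGetD cp s 0))
              * (pvIdx2 di k s - pvIdx2 di k r) else 0) (PySem.List.pyRange 0 n 1)).sum
      = (List.map (fun k =>
          if k ≠ r ∧ k ≠ s then
            pvIdx2 fl (PySem.List.pyGetD cp r 0) (PySem.List.pyGetD cp k 0) * pvIdx2 di s k
            + pvIdx2 fl (PySem.List.pyGetD cp k 0) (PySem.List.pyGetD cp r 0) * pvIdx2 di k s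
          else 0) (PySem.List.pyRange 0 n 1)).sum
      - (List.map (fun k =>
          if k ≠ r ∧ k ≠ s then
            pvIdx2 fl (PySem.List.pyGetD cp r 0) (PySem.List.pyGetD cp k 0) * pvIdx2 di r k
            + pvIdx2 fl (PySem.List.pyGetD cp k 0) (PySem.List.pyGetD cp r 0) * pvIdx2 di k r
          else 0) (PySem.List.pyRange 0 n 1)).sum
      - (List.map (fun k =>
          if k ≠ r ∧ k ≠ s then
            pvIdx2 fl (PySem.List.pyGetD cp s 0) (PySem.List.pyGetD cp k 0) * pvIdx2 di s k
            + pvIdx2 fl (PySem.List.pyGetD cp k 0) (PySem.List.pyGetD cp s 0) * pvIdx2 di k s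
          else 0) (PySem.List.pyRange 0 n 1)).sum
      + (List.map (fun k =>
          if k ≠ r ∧ k ≠ s then
            pvIdx2 fl (PySem.List.pyGetD cp s 0) (PySem.List.pyGetD cp k 0) * pvIdx2 di r k
            + pvIdx2 fl (PySem.List.pyGetD cp k 0) (PySem.List.pyGetD cp s 0) * pvIdx2 di k r
          else 0) (PySem.List.pyRange 0 n 1)).sum := by
    refine pv_sum_map_comb _ _ _ _ _ _ fun k _ => ?_
    dsimp only
    split_ifs <;> ring
  rw [hcomb]
  ring
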